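-- pv_equiv track=rewrite | github.com/freshwaterbruce2/vibetech | projects/tools/prompt-engineer/src/wizards/new_project_wizard.py | _recommend_coding_standards
-- ===== SOURCE A (Python) =====
-- from typing import Dict, List, Any, Optional
--
-- def _recommend_coding_standards(tech_stack: Dict[str, str]) -> str:
--     """Recommend coding standards based on tech stack."""
--     standards = []
--
--     # Check for common technologies
--     stack_str = str(tech_stack.values()).lower()
--
--     if 'typescript' in stack_str or 'javascript' in stack_str:
--         standards.extend([
--             "Use ESLint and Prettier for consistent code formatting",
--             "Follow TypeScript strict mode for type safety",
--             "Use meaningful variable and function names",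
--             "Implement comprehensive error handling with try-catch blocks"
--         ])
--
--     if 'python' in stack_str:
--         standards.extend([
--             "Follow PEP 8 style guidelines",
--             "Use type hints for function parameters and return values",
--             "Implement comprehensive docstrings for all public functions",
--             "Use virtual environments for dependency management"
--         ])
--
--     if 'react' in stack_str:
--         standards.extend([
--             "Use functional components with hooks",
--             "Implement proper prop types and interfaces",
--             "Follow component composition patterns",
--             "Use meaningful component and hook names"
--         ])
--
--     if not standards:
--         standards = [
--             "Follow language-specific best practices and style guides",
--             "Implement consistent naming conventions",
--             "Use proper error handling and logging",
--             "Write self-documenting code with clear comments"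
--         ]
--
--     return "\n".join(f"- {standard}" for standard in standards)
-- ===== SOURCE B (Python) =====
-- # B: precompute, at import time, the full rendered output for every one of the 8
-- # feature combinations; each call just computes a 3-bit feature mask and looks the
-- # finished string up — no list building or joining at call time.
--
-- _BLOCKS = [
--     [
--         "Use ESLint and Prettier for consistent code formatting",
--         "Follow TypeScript strict mode for type safety",
--         "Use meaningful variable and function names",
--         "Implement comprehensive error handling with try-catch blocks",
--     ],
--     [
--         "Follow PEP 8 style guidelines",
--         "Use type hints for function parameters and return values",
--         "Implement comprehensive docstrings for all public functions",
--         "Use virtual environments for dependency management",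
--     ],
--     [
--         "Use functional components with hooks",
--         "Implement proper prop types and interfaces",
--         "Follow component composition patterns",
--         "Use meaningful component and hook names",
--     ],
-- ]
--
-- _FALLBACK = [
--     "Follow language-specific best practices and style guides",
--     "Implement consistent naming conventions",
--     "Use proper error handling and logging",
--     "Write self-documenting code with clear comments",
-- ]
--
--
-- def _render(mask):
--     standards = [s for i, b in enumerate(_BLOCKS) if mask >> i & 1 for s in b]
--     if not standards:
--         standards = _FALLBACK
--     return "\n".join("- " + s for s in standards)
--
--
-- _OUTPUTS = {m: _render(m) for m in range(8)}
--
--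
-- def _recommend_coding_standards(tech_stack):
--     """Recommend coding standards based on tech stack."""
--     hay = str(tech_stack.values()).lower()
--     mask = (int('typescript' in hay or 'javascript' in hay)
--             | int('python' in hay) << 1
--             | int('react' in hay) << 2)
--     return _OUTPUTS[mask]
-- ===== Notes on version B (the rewrite author's own statement) =====
-- stated objective: alternative
-- what changed: All 8 possible outputs are precomputed into a dict keyed by a 3-bit feature bitmask (js/ts, python, react); each call computes the mask and returns the finished precomputed string, instead of conditionally extending a list and joining it on every call.
import Mathlib
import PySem

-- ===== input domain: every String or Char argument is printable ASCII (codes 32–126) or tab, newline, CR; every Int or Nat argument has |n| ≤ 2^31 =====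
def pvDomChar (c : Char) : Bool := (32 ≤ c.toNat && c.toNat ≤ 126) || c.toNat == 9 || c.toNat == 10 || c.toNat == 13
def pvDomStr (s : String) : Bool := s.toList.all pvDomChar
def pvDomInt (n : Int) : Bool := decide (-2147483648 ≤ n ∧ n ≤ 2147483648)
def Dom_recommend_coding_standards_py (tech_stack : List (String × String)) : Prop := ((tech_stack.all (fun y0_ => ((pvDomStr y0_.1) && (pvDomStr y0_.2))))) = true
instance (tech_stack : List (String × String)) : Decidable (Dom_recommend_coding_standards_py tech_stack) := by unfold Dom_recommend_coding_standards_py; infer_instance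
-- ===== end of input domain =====

-- B precomputes the full rendered output for every one of the 8 feature combinations and each
-- call only computes a 3-bit mask and looks the finished string up (objective: alternative).

-- Shared helper: Python's repr() of a str, exact on the Dom alphabet (printable ASCII plus tab/newline/CR):
-- double quotes iff the string contains ' and no ", backslash-escapes for \, the chosen quote, tab, newline, CR.
def pvReprChars (cs : List Char) : List Char :=
  let q : Char := if cs.contains '\'' && !cs.contains '"' then '"' else '\''
  q :: cs.flatMap (fun c =>
    if c = '\\' then ['\\', '\\']
    else if c = q then ['\\', q]
    else if c = '\t' then ['\\', 't']
    else if c = '\n' then ['\\', 'n']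
    else if c = '\r' then ['\\', 'r']
    else [c]) ++ [q]

-- Shared helper: str(tech_stack.values()).lower() — "dict_values([" ++ comma-joined reprs ++ "])", lowered.
def pvStackStr (tech_stack : List (String × String)) : String :=
  let vals := (PySem.Dict.ofList tech_stack).values
  PySem.Str.lower (String.ofList ("dict_values([".toList
    ++ PySem.Chars.join (", ".toList) (vals.map (fun v => pvReprChars v.toList))
    ++ "])".toList))

-- ===== PORT A =====
-- body of A after computing stack_str (helper so the equivalence lemma can abstract over it)
def pvACore (stack_str : String) : String :=
  let standards : List String := []
  let standards :=
    if PySem.Str.isIn "typescript" stack_str || PySem.Str.isIn "javascript" stack_str then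
      standards ++ [
        "Use ESLint and Prettier for consistent code formatting",
        "Follow TypeScript strict mode for type safety",
        "Use meaningful variable and function names",
        "Implement comprehensive error handling with try-catch blocks"]
    else standards
  let standards :=
    if PySem.Str.isIn "python" stack_str then
      standards ++ [
        "Follow PEP 8 style guidelines",
        "Use type hints for function parameters and return values",
        "Implement comprehensive docstrings for all public functions",
        "Use virtual environments for dependency management"]
    else standards
  let standards :=
    if PySem.Str.isIn "react" stack_str then
      standards ++ [
        "Use functional components with hooks",
        "Implement proper prop types and interfaces",
        "Follow component composition patterns",
        "Use meaningful component and hook names"]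
    else standards
  let standards :=
    if standards.isEmpty then [
        "Follow language-specific best practices and style guides",
        "Implement consistent naming conventions",
        "Use proper error handling and logging",
        "Write self-documenting code with clear comments"]
    else standards
  PySem.Str.join "\n" (standards.map (fun st => "- " ++ st))

def recommend_coding_standards_py (tech_stack : List (String × String)) : String :=
  pvACore (pvStackStr tech_stack)

-- ===== PORT B =====
def pvBlocks : List (List String) := [
  [ "Use ESLint and Prettier for consistent code formatting",
    "Follow TypeScript strict mode for type safety",
    "Use meaningful variable and function names",
    "Implement comprehensive error handling with try-catch blocks"],
  [ "Follow PEP 8 style guidelines",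
    "Use type hints for function parameters and return values",
    "Implement comprehensive docstrings for all public functions",
    "Use virtual environments for dependency management"],
  [ "Use functional components with hooks",
    "Implement proper prop types and interfaces",
    "Follow component composition patterns",
    "Use meaningful component and hook names"]]

def pvFallback : List String := [
  "Follow language-specific best practices and style guides",
  "Implement consistent naming conventions",
  "Use proper error handling and logging",
  "Write self-documenting code with clear comments"]

-- _render(mask): the comprehension over enumerate(_BLOCKS) filtered by the mask bits, then join
def pvRender (mask : Nat) : String :=
  let standards := (PySem.List.enumerate pvBlocks).foldl
    (fun acc ib => if mask >>> ib.1.toNat &&& 1 = 1 then acc ++ ib.2 else acc) []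
  let standards := if standards.isEmpty then pvFallback else standards
  PySem.Str.join "\n" (standards.map (fun s => "- " ++ s))

-- _OUTPUTS = {m: _render(m) for m in range(8)}  (module-level dict of the 8 finished strings)
def pvOutputs : PySem.Dict Nat String :=
  PySem.Dict.ofList ((List.range 8).map (fun m => (m, pvRender m)))

-- body of B after computing hay: mask = js | python<<1 | react<<2, then _OUTPUTS[mask]
-- (mask is always in 0..7, so the KeyError branch of _OUTPUTS[mask] is unreachable; getD "" is exact)
def pvBCore (hay : String) : String :=
  let mask : Nat :=
    (if PySem.Str.isIn "typescript" hay || PySem.Str.isIn "javascript" hay then 1 else 0)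
    ||| (if PySem.Str.isIn "python" hay then 1 else 0) <<< 1
    ||| (if PySem.Str.isIn "react" hay then 1 else 0) <<< 2
  (pvOutputs.get? mask).getD ""

def recommend_coding_standards_py_alt (tech_stack : List (String × String)) : String :=
  pvBCore (pvStackStr tech_stack)

-- ===== PRECONDITION & SPEC =====
def Spec_recommend_coding_standards_py (tech_stack : List (String × String)) (out : String) : Prop := out = recommend_coding_standards_py_alt tech_stack
instance (tech_stack : List (String × String)) (out : String) : Decidable (Spec_recommend_coding_standards_py tech_stack out) := by unfold Spec_recommend_coding_standards_py; infer_instance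

-- ===== CLAIM (what is proved, stated in full; the proofs are below) =====
def Claim_equal_recommend_coding_standards_py : Prop := ∀ (tech_stack : List (String × String)), Dom_recommend_coding_standards_py tech_stack → Spec_recommend_coding_standards_py tech_stack (recommend_coding_standards_py tech_stack)

-- ===== LEMMAS AND PROOFS =====

set_option maxRecDepth 4000 in
theorem pvCore_eq (s : String) : pvACore s = pvBCore s := by
  unfold pvACore pvBCore
  cases hj : PySem.Str.isIn "typescript" s || PySem.Str.isIn "javascript" s <;>
    cases hp : PySem.Str.isIn "python" s <;>
      cases hr : PySem.Str.isIn "react" s <;>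
        rfl

-- ===== VERDICT (by name: the statement is the Claim_ definition above) =====
theorem recommend_coding_standards_py_spec : Claim_equal_recommend_coding_standards_py := by
  intro ts _
  unfold Spec_recommend_coding_standards_py recommend_coding_standards_py recommend_coding_standards_py_alt
  exact pvCore_eq (pvStackStr ts)
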